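-- pv_equiv track=rewrite | github.com/HeeJunDID/algorithm-study | 연구소/solution.py | set_wall
-- ===== SOURCE A (Python) =====
-- import copy
-- from itertools import combinations
--
-- def set_wall(lab):
--     """
--     벽을 세울 수 있는 모든 경우의 수의 맵을 뽑아냄
--     """
--     n,m = len(lab), len(lab[0])
--     z_loc = []
--     for i in range(n):
--         for j in range(m):
--             if lab[i][j] == 0:
--                 z_loc.append((i,j))
--     num_of_case = list(combinations(z_loc, 3))
--
--     lab_of_case = []
--     for c in num_of_case:
--
--         temp_lab = copy.deepcopy(lab)
--         x1, y1 = c[0]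
--         x2, y2 = c[1]
--         x3, y3 = c[2]
--         temp_lab[x1][y1] = 1
--         temp_lab[x2][y2] = 1
--         temp_lab[x3][y3] = 1
--         lab_of_case.append(temp_lab)
--     return lab_of_case
-- ===== SOURCE B (Python) =====
-- def set_wall(lab):
--     """
--     벽을 세울 수 있는 모든 경우의 수의 맵을 뽑아냄
--     """
--     n, m = len(lab), len(lab[0])
--     total = n * m
--     g = [row[:] for row in lab]
--     res = []
--
--     def dfs(start, count):
--         if count == 3:
--             res.append([row[:] for row in g])
--             return
--         for idx in range(start, total):
--             i, j = divmod(idx, m)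
--             if g[i][j] == 0:
--                 g[i][j] = 1
--                 dfs(idx + 1, count + 1)
--                 g[i][j] = 0
--
--     dfs(0, 0)
--     return res
-- ===== Notes on version B (the rewrite author's own statement) =====
-- stated objective: alternative
-- what changed: Replaces itertools.combinations over the precomputed zero-cell list plus a full deepcopy per case by recursive backtracking on one mutable working grid: scan cells row-major from a start index, place a wall, recurse, snapshot rows at 3 walls, then reset the cell.
import Mathlib
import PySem

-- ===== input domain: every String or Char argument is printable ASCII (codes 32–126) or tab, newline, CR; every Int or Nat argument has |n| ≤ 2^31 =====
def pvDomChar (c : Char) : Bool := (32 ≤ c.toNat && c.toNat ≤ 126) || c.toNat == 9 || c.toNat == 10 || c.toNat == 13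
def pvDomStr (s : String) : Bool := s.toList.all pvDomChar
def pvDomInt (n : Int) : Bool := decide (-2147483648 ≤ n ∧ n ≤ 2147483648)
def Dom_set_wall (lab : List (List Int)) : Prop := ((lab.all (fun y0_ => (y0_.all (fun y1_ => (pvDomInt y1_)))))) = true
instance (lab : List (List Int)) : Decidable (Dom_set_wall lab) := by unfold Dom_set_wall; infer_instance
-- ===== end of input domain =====

-- B replaces itertools.combinations + per-case deepcopy by recursive backtracking on one
-- working grid (set cell, recurse from the next row-major index, snapshot at 3 walls, reset).

-- lab[i][j] (in-range on Pre_; getD is exact there)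
def pvCell (g : List (List Int)) (i j : Nat) : Int := (g.getD i []).getD j 0

-- temp_lab[i][j] = v
def pvSetCell (g : List (List Int)) (i j : Nat) (v : Int) : List (List Int) :=
  g.modify i (fun row => row.set j v)

-- ===== PORT A =====
-- itertools.combinations(l, k) as lists (standard recursive semantics, same order)
def pyComb {α : Type} : Nat → List α → List (List α)
  | 0, _ => [[]]
  | _ + 1, [] => []
  | k + 1, x :: xs => (pyComb k xs).map (fun s => x :: s) ++ pyComb (k + 1) xs

def set_wall (lab : List (List Int)) : List (List (List Int)) :=
  let n := lab.length
  let m := (lab.headD []).length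
  -- nested loops collecting the zero cells row-major
  let z_loc := (List.range n).flatMap (fun i =>
    ((List.range m).filter (fun j => pvCell lab i j == 0)).map (fun j => (i, j)))
  let num_of_case := pyComb 3 z_loc
  -- for each case: deepcopy and set the three cells (c[0], c[1], c[2])
  num_of_case.map (fun c =>
    let p1 := c.getD 0 (0, 0)
    let p2 := c.getD 1 (0, 0)
    let p3 := c.getD 2 (0, 0)
    pvSetCell (pvSetCell (pvSetCell lab p1.1 p1.2 1) p2.1 p2.2 1) p3.1 p3.2 1)

-- ===== PORT B =====
-- dfs over the remaining row-major flat indices; k = walls still to place;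
-- on a zero cell: place the wall, recurse on the rest, then (implicitly) restore g
def pvDfs (m : Nat) (g : List (List Int)) (idxs : List Nat) (k : Nat) : List (List (List Int)) :=
  match k, idxs with
  | 0, _ => [g]
  | _ + 1, [] => []
  | k + 1, idx :: rest =>
      (if pvCell g (idx / m) (idx % m) == 0 then
        pvDfs m (pvSetCell g (idx / m) (idx % m) 1) rest k
      else []) ++ pvDfs m g rest (k + 1)

def set_wall_alt (lab : List (List Int)) : List (List (List Int)) :=
  let n := lab.length
  let m := (lab.headD []).length
  pvDfs m lab (List.range (n * m)) 3

-- ===== PRECONDITION & SPEC =====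
-- Pre_ excludes exactly the inputs on which Python A raises IndexError:
-- the empty grid (lab[0]) and grids with a row shorter than row 0 (lab[i][j], j < m).
def Pre_set_wall (lab : List (List Int)) : Prop :=
  lab ≠ [] ∧ ∀ row ∈ lab, (lab.headD []).length ≤ row.length
instance (lab : List (List Int)) : Decidable (Pre_set_wall lab) := by
  unfold Pre_set_wall; infer_instance

def pvWitness_set_wall : List (List Int) := [[0, 0], [0, 1]]

def Spec_set_wall (lab : List (List Int)) (out : List (List (List Int))) : Prop := out = set_wall_alt lab
instance (lab : List (List Int)) (out : List (List (List Int))) : Decidable (Spec_set_wall lab out) := by unfold Spec_set_wall; infer_instance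

-- ===== CLAIM (what is proved, stated in full; the proofs are below) =====
def Claim_equal_set_wall : Prop := ∀ (lab : List (List Int)), Dom_set_wall lab → Pre_set_wall lab → Spec_set_wall lab (set_wall lab)

-- ===== LEMMAS AND PROOFS =====

-- every member of pyComb k l has length k
theorem pyComb_length {α : Type} (k : Nat) (l : List α) :
    ∀ s ∈ pyComb k l, s.length = k := by
  induction l generalizing k with
  | nil => cases k <;> simp [pyComb]
  | cons x xs ih =>
    cases k with
    | zero => simp [pyComb]
    | succ k =>
      intro s hs
      simp only [pyComb, List.mem_append, List.mem_map] at hs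
      rcases hs with ⟨t, ht, rfl⟩ | hs
      · simp [ih k t ht]
      · exact ih (k + 1) s hs

theorem pyComb_map {α β : Type} (f : α → β) (k : Nat) (l : List α) :
    pyComb k (l.map f) = (pyComb k l).map (List.map f) := by
  induction l generalizing k with
  | nil => cases k <;> simp [pyComb]
  | cons x xs ih =>
    cases k with
    | zero => simp [pyComb]
    | succ k => simp [pyComb, ih k, ih (k + 1), Function.comp]

-- setting a cell at flat index a does not change the cell at a different flat index b
theorem pvCell_set_ne (g : List (List Int)) (m a b : Nat) (hab : a ≠ b) :
    pvCell (pvSetCell g (a / m) (a % m) 1) (b / m) (b % m) = pvCell g (b / m) (b % m) := by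
  unfold pvCell pvSetCell
  by_cases hi : a / m = b / m
  · have hj : a % m ≠ b % m := by
      intro hj
      exact hab (by
        have h1 : m * (a / m) + a % m = a := Nat.div_add_mod a m
        have h2 : m * (b / m) + b % m = b := Nat.div_add_mod b m
        have h3 : m * (a / m) = m * (b / m) := by rw [hi]
        omega)
    rw [hi]
    simp only [List.getD, List.getElem?_modify]
    cases h : g[b / m]? with
    | none => simp
    | some row => simp [List.getElem?_set_ne hj]
  · simp [List.getD, hi]

-- main dfs invariant: dfs enumerates, in combinations order, one snapshot per
-- k-subset of the zero cells among idxs, each snapshot = g with those cells set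
theorem pvDfs_eq (m : Nat) (idxs : List Nat) :
    idxs.Pairwise (· < ·) → ∀ (k : Nat) (g : List (List Int)),
    pvDfs m g idxs k =
      (pyComb k (idxs.filter (fun idx => pvCell g (idx / m) (idx % m) == 0))).map
        (fun s => s.foldl (fun h idx => pvSetCell h (idx / m) (idx % m) 1) g) := by
  induction idxs with
  | nil =>
    intro _ k g
    cases k <;> simp [pvDfs, pyComb]
  | cons idx rest ih =>
    intro hp k g
    have hlt : ∀ b ∈ rest, idx < b := (List.pairwise_cons.mp hp).1
    have hrest : rest.Pairwise (· < ·) := (List.pairwise_cons.mp hp).2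
    cases k with
    | zero => simp [pvDfs, pyComb]
    | succ k =>
      by_cases h0 : pvCell g (idx / m) (idx % m) == 0
      · have hfilter :
            rest.filter (fun i => pvCell (pvSetCell g (idx / m) (idx % m) 1) (i / m) (i % m) == 0)
              = rest.filter (fun i => pvCell g (i / m) (i % m) == 0) := by
          apply List.filter_congr
          intro b hb
          rw [pvCell_set_ne g m idx b (Nat.ne_of_lt (hlt b hb))]
        simp only [pvDfs, h0, if_true, List.filter_cons, pyComb,
          ih hrest k (pvSetCell g (idx / m) (idx % m) 1),
          ih hrest (k + 1) g, hfilter, List.map_append, List.map_map]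
        rfl
      · simp only [pvDfs, h0, if_false, List.filter_cons, Bool.false_eq_true,
          ih hrest (k + 1) g, List.nil_append]

-- row-major flat indices decoded by divmod are exactly the (i, j) pairs
theorem range_divmod (m : Nat) (hm : 0 < m) (n : Nat) :
    (List.range (n * m)).map (fun idx => (idx / m, idx % m)) =
      (List.range n).flatMap (fun i => (List.range m).map (fun j => (i, j))) := by
  induction n with
  | zero => simp
  | succ n ih =>
    have h1 : (n + 1) * m = n * m + m := by ring
    rw [h1, List.range_add, List.map_append, ih, List.range_succ, List.flatMap_append]
    simp only [List.flatMap_cons, List.flatMap_nil, List.append_nil, List.map_map]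
    congr 1
    apply List.map_congr_left
    intro j hj
    have hj' : j < m := List.mem_range.mp hj
    show ((n * m + j) / m, (n * m + j) % m) = (n, j)
    rw [Nat.add_comm (n * m) j, Nat.add_mul_div_right _ _ hm, Nat.add_mul_mod_self_right,
      Nat.div_eq_of_lt hj', Nat.mod_eq_of_lt hj', Nat.zero_add]

theorem set_wall_eq_alt (lab : List (List Int)) : set_wall lab = set_wall_alt lab := by
  unfold set_wall set_wall_alt
  dsimp only
  by_cases hm : (lab.headD []).length = 0
  · rw [hm]
    simp only [pvDfs, Nat.mul_zero, List.range_zero, List.filter_nil, List.map_nil]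
    have h0 : (List.range lab.length).flatMap (fun _ => ([] : List (Nat × Nat))) = [] := by simp
    rw [h0]
    simp [pyComb]
  · have hm' : 0 < (lab.headD []).length := Nat.pos_of_ne_zero hm
    set m := (lab.headD []).length with hmdef
    set n := lab.length with hndef
    rw [pvDfs_eq m _ List.pairwise_lt_range 3 lab]
    have hz :
        (List.range n).flatMap (fun i =>
            ((List.range m).filter (fun j => pvCell lab i j == 0)).map (fun j => (i, j)))
          = ((List.range (n * m)).filter
              (fun idx => pvCell lab (idx / m) (idx % m) == 0)).map
              (fun idx => (idx / m, idx % m)) := by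
      have h1 :
          ((List.range (n * m)).filter
              (fun idx => pvCell lab (idx / m) (idx % m) == 0)).map
              (fun idx => (idx / m, idx % m))
            = ((List.range (n * m)).map (fun idx => (idx / m, idx % m))).filter
                (fun p => pvCell lab p.1 p.2 == 0) :=
        (List.filter_map (f := fun idx => (idx / m, idx % m))
          (p := fun p => pvCell lab p.1 p.2 == 0) (l := List.range (n * m))).symm
      rw [h1, range_divmod m hm' n, List.filter_flatMap]
      congr 1
      funext i
      exact (List.filter_map (f := fun j => (i, j))
        (p := fun p => pvCell lab p.1 p.2 == 0) (l := List.range m)).symm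
    rw [hz, pyComb_map, List.map_map]
    apply List.map_congr_left
    intro s hs
    have hs3 := pyComb_length 3 _ s hs
    match s, hs3 with
    | [a, b, c], _ => rfl

-- ===== VERDICT (by name: the statement is the Claim_ definition above) =====
theorem set_wall_spec : Claim_equal_set_wall := by
  intro lab _ _
  unfold Spec_set_wall
  exact set_wall_eq_alt lab
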